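-- pv_equiv track=rewrite | github.com/paulrahul/algo | codility/silver20_max_rect_strip.py | solution
-- ===== SOURCE A (Python) =====
-- from collections import defaultdict
--
-- def solution(A, B):
--     side_rect_count = defaultdict(int)
--
--     n = len(A)
--     ans = 1
--     for i in range(n):
--         l = A[i]
--         b = B[i]
--
--         if l == b:
--             side_rect_count[l] += 1
--         else:
--             side_rect_count[l] += 1
--             side_rect_count[b] += 1
--
--         ans = max(ans, side_rect_count[l], side_rect_count[b])
--
--     return ans
-- ===== SOURCE B (Python) =====
-- def solution(A, B):
--     sides = []
--     for a, b in zip(A, B):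
--         sides.append(a)
--         if b != a:
--             sides.append(b)
--     best = 1
--     while sides:
--         s = sides[0]
--         best = max(best, sides.count(s))
--         sides = [x for x in sides if x != s]
--     return best
-- ===== Notes on version B (the rewrite author's own statement) =====
-- stated objective: alternative
-- what changed: B keeps no dictionary at all: it materialises the list of sides (one entry per rectangle side, squares once), then repeatedly takes the first remaining value, counts its occurrences with list.count, and filters all of them out, so the maximum multiplicity is found by a distinct-value sweep (count-and-remove) instead of A's single hash-counting pass with an interleaved running max.
import Mathlib
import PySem

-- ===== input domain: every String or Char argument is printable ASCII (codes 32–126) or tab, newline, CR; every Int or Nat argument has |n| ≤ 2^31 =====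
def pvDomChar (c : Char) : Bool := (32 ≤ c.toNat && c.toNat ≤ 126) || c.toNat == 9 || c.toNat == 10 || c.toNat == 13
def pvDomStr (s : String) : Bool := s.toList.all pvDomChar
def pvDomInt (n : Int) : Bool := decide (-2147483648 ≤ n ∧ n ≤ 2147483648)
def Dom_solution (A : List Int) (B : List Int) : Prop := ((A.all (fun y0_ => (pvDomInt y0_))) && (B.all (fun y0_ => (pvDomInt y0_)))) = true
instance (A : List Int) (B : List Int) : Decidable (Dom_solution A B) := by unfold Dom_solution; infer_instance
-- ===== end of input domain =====

-- B replaces A's dict-counting pass with a distinct-value sweep: it builds the side list once,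
-- then repeatedly counts and filters out the first remaining value, keeping the best count.

-- ===== PORT A =====
-- A's loop body (the code inside `for i in range(n)`), as a helper.
def solutionStep (A : List Int) (B : List Int)
    (st : PySem.Dict Int Int × Int) (i : Int) : PySem.Dict Int Int × Int :=
  let l := PySem.List.pyGetD A i 0
  let b := PySem.List.pyGetD B i 0
  let d :=
    if l == b then st.1.insert l (st.1.getD l 0 + 1)
    else
      let d1 := st.1.insert l (st.1.getD l 0 + 1)
      d1.insert b (d1.getD b 0 + 1)
  (d, max (max st.2 (d.getD l 0)) (d.getD b 0))

def solution (A : List Int) (B : List Int) : Int :=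
  let n : Int := (A.length : Int)
  ((PySem.List.pyRange 0 n 1).foldl (solutionStep A B) (PySem.Dict.empty, 1)).2

-- ===== PORT B =====
-- the `while sides:` loop: take the first value, count it, filter it out, keep the best
def solutionAltLoop : Int → List Int → Int
  | best, [] => best
  | best, s :: t =>
      solutionAltLoop (max best ((PySem.List.count (s :: t) s : Nat) : Int))
        ((s :: t).filter (fun x => x != s))
  termination_by _ L => L.length
  decreasing_by
    simp only [List.filter]
    have hs : (s != s) = false := by simp
    rw [hs]
    exact Nat.lt_succ_of_le (List.length_filter_le _ t)

def solution_alt (A : List Int) (B : List Int) : Int :=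
  let sides := (A.zip B).foldl
    (fun acc p => let acc1 := acc ++ [p.1]; if p.2 != p.1 then acc1 ++ [p.2] else acc1) []
  solutionAltLoop 1 sides

-- ===== PRECONDITION & SPEC =====
-- Pre_ excludes exactly the inputs with len(B) < len(A): there A raises IndexError at B[i]
-- (it returns on every other input, so nothing A returns on is excluded).
def Pre_solution (A : List Int) (B : List Int) : Prop := A.length ≤ B.length
instance (A : List Int) (B : List Int) : Decidable (Pre_solution A B) := by unfold Pre_solution; infer_instance
def pvWitness_solution : List Int × List Int := ([2, 3, 2], [3, 3, 5])

def Spec_solution (A : List Int) (B : List Int) (out : Int) : Prop := out = solution_alt A B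
instance (A : List Int) (B : List Int) (out : Int) : Decidable (Spec_solution A B out) := by unfold Spec_solution; infer_instance

-- ===== CLAIM (what is proved, stated in full; the proofs are below) =====
def Claim_equal_solution : Prop := ∀ (A : List Int) (B : List Int), Dom_solution A B → Pre_solution A B → Spec_solution A B (solution A B)

-- ===== LEMMAS AND PROOFS =====

-- count of x in L, as an Int
def cntI (L : List Int) (x : Int) : Int := (L.count x : Int)

-- characterisation of both programs' answer: max(1, maximum multiplicity in L)
def IsAns (L : List Int) (r : Int) : Prop :=
  1 ≤ r ∧ (∀ x ∈ L, cntI L x ≤ r) ∧ (r = 1 ∨ ∃ x ∈ L, r = cntI L x)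

theorem IsAns_unique {L : List Int} {r r' : Int} (h : IsAns L r) (h' : IsAns L r') : r = r' := by
  obtain ⟨h1, h2, h3⟩ := h
  obtain ⟨h1', h2', h3'⟩ := h'
  have hle : r ≤ r' := by
    rcases h3 with rfl | ⟨x, hx, rfl⟩
    · exact h1'
    · exact h2' x hx
  have hge : r' ≤ r := by
    rcases h3' with rfl | ⟨x, hx, rfl⟩
    · exact h1
    · exact h2 x hx
  omega

-- the side-block of one rectangle (l, b): [l] or [l, b]
def blockOf (p : Int × Int) : List Int := if p.2 != p.1 then [p.1, p.2] else [p.1]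

theorem cnt_append_block (L : List Int) (p : Int × Int) (x : Int) :
    cntI (L ++ blockOf p) x
      = cntI L x + (if p.1 = x then 1 else 0)
          + (if p.2 = x ∧ p.2 ≠ p.1 then 1 else 0) := by
  unfold cntI blockOf
  by_cases h : p.2 = p.1
  · have hb : (p.2 != p.1) = false := by simp [h]
    rw [hb]
    simp only [Bool.false_eq_true, if_false, List.count_append, List.count_cons,
      List.count_nil, beq_iff_eq]
    push_cast
    split_ifs <;> simp_all
  · have hb : (p.2 != p.1) = true := by simpa [bne_iff_ne] using h
    rw [hb]
    simp only [if_true, List.count_append, List.count_cons, List.count_nil, beq_iff_eq]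
    push_cast
    split_ifs <;> simp_all

-- A's loop body as a function of the pair (A[i], B[i]).
def stepA (st : PySem.Dict Int Int × Int) (p : Int × Int) : PySem.Dict Int Int × Int :=
  let d :=
    if p.1 == p.2 then st.1.insert p.1 (st.1.getD p.1 0 + 1)
    else
      let d1 := st.1.insert p.1 (st.1.getD p.1 0 + 1)
      d1.insert p.2 (d1.getD p.2 0 + 1)
  (d, max (max st.2 (d.getD p.1 0)) (d.getD p.2 0))

-- the invariant A's fold maintains, relative to the sides of the processed prefix
def InvA (L : List Int) (st : PySem.Dict Int Int × Int) : Prop :=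
  (∀ x : Int, st.1.getD x 0 = cntI L x) ∧ IsAns L st.2

theorem stepA_preserves (L : List Int) (st : PySem.Dict Int Int × Int) (p : Int × Int)
    (h : InvA L st) : InvA (L ++ blockOf p) (stepA st p) := by
  obtain ⟨hd, hans1, hans2, hans3⟩ := h
  obtain ⟨d, ans⟩ := st
  simp only [InvA, stepA]
  by_cases hlb : p.1 = p.2
  · have hc : (p.1 == p.2) = true := by simpa using hlb
    simp only [hc, if_true]
    have hgd : ∀ x : Int, (d.insert p.1 (d.getD p.1 0 + 1)).getD x 0 = cntI (L ++ blockOf p) x := by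
      intro x
      rw [cnt_append_block]
      by_cases hx : x = p.1
      · subst hx
        rw [PySem.Dict.getD_insert_self, hd]
        simp [← hlb]
      · rw [PySem.Dict.getD_insert_of_ne _ _ _ hx, hd]
        have : p.1 ≠ x := fun h => hx h.symm
        simp [this, ← hlb]
    refine ⟨hgd, ?_, ?_, ?_⟩
    · omega
    · intro x hx
      rcases List.mem_append.mp hx with hxL | hxB
      · by_cases hx1 : x = p.1
        · subst hx1
          rw [← hgd]
          omega
        · have : cntI (L ++ blockOf p) x = cntI L x := by
            rw [cnt_append_block]
            have h1 : p.1 ≠ x := fun h => hx1 h.symm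
            have h2 : ¬ (p.2 = x ∧ p.2 ≠ p.1) := by
              rintro ⟨h2a, _⟩; exact h1 (hlb.trans h2a)
            simp [h1, h2]
          rw [this]
          have := hans2 x hxL
          omega
      · have hxp : x = p.1 := by
          unfold blockOf at hxB
          have : (p.2 != p.1) = false := by simp [← hlb]
          simp [this] at hxB
          exact hxB
        subst hxp
        rw [← hgd]
        omega
    · -- the new ans is ans, or the new count of p.1 / p.2
      set c := (d.insert p.1 (d.getD p.1 0 + 1)).getD p.1 0 with hc'
      have hcb : (d.insert p.1 (d.getD p.1 0 + 1)).getD p.2 0 = c := by rw [← hlb]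
      rw [hcb]
      have hcc : c = cntI (L ++ blockOf p) p.1 := hgd p.1
      by_cases hm : max (max ans c) c = c
      · right
        refine ⟨p.1, ?_, by rw [hm, hcc]⟩
        apply List.mem_append.mpr
        right
        unfold blockOf
        have : (p.2 != p.1) = false := by simp [← hlb]
        simp [this]
      · have hma : max (max ans c) c = ans := by omega
        rw [hma]
        rcases hans3 with rfl | ⟨x, hx, rfl⟩
        · left; rfl
        · right
          refine ⟨x, List.mem_append.mpr (Or.inl hx), ?_⟩
          -- count of x did not grow past ans, and counts only grow
          have hmono : cntI L x ≤ cntI (L ++ blockOf p) x := by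
            rw [cnt_append_block]; split_ifs <;> omega
          have hup : cntI (L ++ blockOf p) x ≤ cntI L x := by
            by_cases hx1 : x = p.1
            · subst hx1
              rw [← hcc]
              omega
            · rw [cnt_append_block]
              have h1 : p.1 ≠ x := fun h => hx1 h.symm
              have h2 : ¬ (p.2 = x ∧ p.2 ≠ p.1) := by
                rintro ⟨h2a, _⟩; exact h1 (hlb.trans h2a)
              simp [h1, h2]
          omega
  · have hc : (p.1 == p.2) = false := by simpa using hlb
    simp only [hc, Bool.false_eq_true, if_false]
    set d1 := d.insert p.1 (d.getD p.1 0 + 1) with hd1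
    set d2 := d1.insert p.2 (d1.getD p.2 0 + 1) with hd2
    have hgd : ∀ x : Int, d2.getD x 0 = cntI (L ++ blockOf p) x := by
      intro x
      rw [cnt_append_block]
      by_cases hx2 : x = p.2
      · rw [hx2, hd2, PySem.Dict.getD_insert_self, hd1,
          PySem.Dict.getD_insert_of_ne _ _ _ (fun h => hlb h.symm), hd]
        have h1 : p.1 ≠ p.2 := hlb
        simp [h1, Ne.symm hlb]
      · rw [hd2, PySem.Dict.getD_insert_of_ne _ _ _ hx2]
        by_cases hx1 : x = p.1
        · rw [hx1, hd1, PySem.Dict.getD_insert_self, hd]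
          have h2 : ¬ (p.2 = p.1 ∧ p.2 ≠ p.1) := by
            rintro ⟨h2a, h2b⟩; exact h2b h2a
          simp [h2]
        · rw [hd1, PySem.Dict.getD_insert_of_ne _ _ _ hx1, hd]
          have h1 : p.1 ≠ x := fun h => hx1 h.symm
          have h2 : ¬ (p.2 = x ∧ p.2 ≠ p.1) := by
            rintro ⟨h2a, _⟩; exact hx2 h2a.symm
          simp [h1, h2]
    refine ⟨hgd, ?_, ?_, ?_⟩
    · omega
    · intro x hx
      rw [← hgd]
      by_cases hx1 : x = p.1
      · subst hx1; omega
      · by_cases hx2 : x = p.2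
        · subst hx2; omega
        · have heq : d2.getD x 0 = cntI L x := by
            rw [hgd, cnt_append_block]
            have h1 : p.1 ≠ x := fun h => hx1 h.symm
            have h2 : ¬ (p.2 = x ∧ p.2 ≠ p.1) := by
              rintro ⟨h2a, _⟩; exact hx2 h2a.symm
            simp [h1, h2]
          rw [heq]
          have hxL : x ∈ L := by
            rcases List.mem_append.mp hx with hxL | hxB
            · exact hxL
            · exfalso
              unfold blockOf at hxB
              have : (p.2 != p.1) = true := by simpa [bne_iff_ne] using fun h => hlb h.symm
              simp [this] at hxB
              rcases hxB with h | h
              · exact hx1 h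
              · exact hx2 h
          have := hans2 x hxL
          omega
    · set cl := d2.getD p.1 0 with hcl
      set cb := d2.getD p.2 0 with hcb2
      have hmemL : p.1 ∈ L ++ blockOf p := by
        apply List.mem_append.mpr; right
        unfold blockOf
        have : (p.2 != p.1) = true := by simpa [bne_iff_ne] using fun h => hlb h.symm
        simp [this]
      have hmemB : p.2 ∈ L ++ blockOf p := by
        apply List.mem_append.mpr; right
        unfold blockOf
        have : (p.2 != p.1) = true := by simpa [bne_iff_ne] using fun h => hlb h.symm
        simp [this]
      by_cases hm1 : max (max ans cl) cb = cb
      · right; exact ⟨p.2, hmemB, by rw [hm1, hcb2, hgd]⟩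
      · by_cases hm2 : max (max ans cl) cb = cl
        · right; exact ⟨p.1, hmemL, by rw [hm2, hcl, hgd]⟩
        · have hma : max (max ans cl) cb = ans := by omega
          rw [hma]
          rcases hans3 with rfl | ⟨x, hx, rfl⟩
          · left; rfl
          · right
            refine ⟨x, List.mem_append.mpr (Or.inl hx), ?_⟩
            have hmono : cntI L x ≤ cntI (L ++ blockOf p) x := by
              rw [cnt_append_block]; split_ifs <;> omega
            have hup : cntI (L ++ blockOf p) x ≤ cntI L x := by
              by_cases hx1 : x = p.1
              · subst hx1
                have := hgd p.1
                omega
              · by_cases hx2 : x = p.2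
                · subst hx2
                  have := hgd p.2
                  omega
                · rw [cnt_append_block]
                  have h1 : p.1 ≠ x := fun h => hx1 h.symm
                  have h2 : ¬ (p.2 = x ∧ p.2 ≠ p.1) := by
                    rintro ⟨h2a, _⟩; exact hx2 h2a.symm
                  simp [h1, h2]
            omega

theorem foldA_inv (ps : List (Int × Int)) (L : List Int) (st : PySem.Dict Int Int × Int)
    (h : InvA L st) : InvA (L ++ ps.flatMap blockOf) (ps.foldl stepA st) := by
  induction ps generalizing L st with
  | nil => simpa using h
  | cons p t ih =>
      have := ih (L ++ blockOf p) (stepA st p) (stepA_preserves L st p h)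
      simpa [List.append_assoc] using this

theorem IsAns_A (ps : List (Int × Int)) :
    IsAns (ps.flatMap blockOf) (ps.foldl stepA (PySem.Dict.empty, 1)).2 := by
  have h0 : InvA [] ((PySem.Dict.empty : PySem.Dict Int Int), (1 : Int)) := by
    refine ⟨fun x => ?_, le_refl _, fun x hx => absurd hx (List.not_mem_nil), Or.inl rfl⟩
    rw [PySem.Dict.getD_empty]
    simp [cntI]
  have := foldA_inv ps [] _ h0
  simpa using this.2

-- B's loop: what solutionAltLoop computes, relative to best and the remaining list
theorem loopB_spec (L : List Int) (best : Int) :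
    best ≤ solutionAltLoop best L ∧ (∀ x ∈ L, cntI L x ≤ solutionAltLoop best L) ∧
      (solutionAltLoop best L = best ∨ ∃ x ∈ L, solutionAltLoop best L = cntI L x) := by
  induction best, L using solutionAltLoop.induct with
  | case1 best => simp [solutionAltLoop]
  | case2 best s t ih =>
      obtain ⟨ih1, ih2, ih3⟩ := ih
      have hrec : solutionAltLoop best (s :: t)
          = solutionAltLoop (max best ((PySem.List.count (s :: t) s : Nat) : Int))
              ((s :: t).filter (fun x => x != s)) := by
        rw [solutionAltLoop]
      set r := solutionAltLoop (max best ((PySem.List.count (s :: t) s : Nat) : Int))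
          ((s :: t).filter (fun x => x != s)) with hr
      have hcount : ((PySem.List.count (s :: t) s : Nat) : Int) = cntI (s :: t) s := by
        rw [PySem.List.count_eq]; rfl
      have hcf : ∀ x : Int, x ≠ s →
          cntI ((s :: t).filter (fun y => y != s)) x = cntI (s :: t) x := by
        intro x hx
        unfold cntI
        rw [List.count_filter (by simpa [bne_iff_ne] using hx)]
      rw [hrec]
      refine ⟨le_trans (le_max_left _ _) ih1, ?_, ?_⟩
      · intro x hx
        by_cases hxs : x = s
        · rw [hxs]
          exact le_trans (hcount ▸ le_max_right best _) ih1
        · have hxm : x ∈ (s :: t).filter (fun y => y != s) := by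
            apply List.mem_filter.mpr
            exact ⟨hx, by simpa [bne_iff_ne] using hxs⟩
          have := ih2 x hxm
          rw [hcf x hxs] at this
          exact this
      · rcases ih3 with hb | ⟨x, hx, hxe⟩
        · rcases max_cases best ((PySem.List.count (s :: t) s : Nat) : Int) with ⟨h1, _⟩ | ⟨h1, _⟩
          · left; rw [hb, h1]
          · right
            exact ⟨s, List.mem_cons_self, by rw [hb, h1, hcount]⟩
        · right
          have hxm := List.mem_filter.mp hx
          have hxs : x ≠ s := by simpa [bne_iff_ne] using hxm.2
          exact ⟨x, hxm.1, by rw [hxe, hcf x hxs]⟩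

-- B's side list equals the flatMap of blocks
theorem sides_eq (ps : List (Int × Int)) (acc : List Int) :
    ps.foldl (fun acc p => let acc1 := acc ++ [p.1];
        if p.2 != p.1 then acc1 ++ [p.2] else acc1) acc
      = acc ++ ps.flatMap blockOf := by
  induction ps generalizing acc with
  | nil => simp
  | cons p t ih =>
      simp only [List.foldl_cons, List.flatMap_cons, ih]
      unfold blockOf
      by_cases h : (p.2 != p.1) = true
      · simp [h]
      · have h' : (p.2 != p.1) = false := by simpa using h
        simp [h']

theorem IsAns_B (A B : List Int) : IsAns ((A.zip B).flatMap blockOf) (solution_alt A B) := by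
  unfold solution_alt
  rw [sides_eq, List.nil_append]
  set S := (A.zip B).flatMap blockOf
  obtain ⟨h1, h2, h3⟩ := loopB_spec S 1
  exact ⟨h1, h2, h3⟩

-- A's pyRange fold over indices equals the fold of stepA over the zipped pairs
theorem fold_range_zip (A B : List Int) (init : PySem.Dict Int Int × Int) (n : Nat)
    (hA : n ≤ A.length) (hB : n ≤ B.length) :
    ((List.range n).map (fun k : Nat => (0 : Int) + (k : Int))).foldl (solutionStep A B) init
      = ((A.zip B).take n).foldl stepA init := by
  induction n with
  | zero => rfl
  | succ n ih =>
      have hA' : n ≤ A.length := Nat.le_of_succ_le hA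
      have hB' : n ≤ B.length := Nat.le_of_succ_le hB
      have hnz : n < (A.zip B).length := by rw [List.length_zip]; omega
      rw [List.range_succ, List.map_append, List.foldl_append, ih hA' hB', List.take_add_one]
      have hz : (A.zip B)[n]? = some (A[n]'(by omega), B[n]'(by omega)) := by
        rw [List.getElem?_eq_getElem hnz, List.getElem_zip]
      rw [hz]
      simp only [List.map_cons, List.map_nil, List.foldl_cons, List.foldl_nil,
        Option.toList_some, List.foldl_append]
      have hga : PySem.List.pyGetD A ((0 : Int) + (n : Int)) 0 = A[n]'(by omega) := by
        rw [zero_add, PySem.List.pyGetD_natCast,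
          List.getD_eq_getElem?_getD, List.getElem?_eq_getElem (show n < A.length by omega)]
        rfl
      have hgb : PySem.List.pyGetD B ((0 : Int) + (n : Int)) 0 = B[n]'(by omega) := by
        rw [zero_add, PySem.List.pyGetD_natCast,
          List.getD_eq_getElem?_getD, List.getElem?_eq_getElem (show n < B.length by omega)]
        rfl
      show solutionStep A B _ _ = stepA _ _
      unfold solutionStep stepA
      rw [hga, hgb]

-- ===== VERDICT (by name: the statement is the Claim_ definition above) =====
theorem solution_spec : Claim_equal_solution := by
  intro A B _ hpre
  unfold Pre_solution at hpre
  unfold Spec_solution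
  have hA : IsAns ((A.zip B).flatMap blockOf) (solution A B) := by
    unfold solution
    simp only [PySem.List.pyRange_one, sub_zero, Int.toNat_natCast]
    rw [fold_range_zip A B _ A.length (le_refl _) hpre,
      List.take_of_length_le (by rw [List.length_zip]; omega)]
    exact IsAns_A (A.zip B)
  exact IsAns_unique hA (IsAns_B A B)
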